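-- pv_equiv track=rewrite | github.com/cirosantilli/project-euler-solvers | solvers/265.py | search
-- ===== SOURCE A (Python) =====
-- bits = 5
--
-- def search(history, sequence):
--     mask = (1 << bits) - 1
--     all_bits = (1 << (1 << bits)) - 1
--     if history == all_bits:
--         sequence >>= bits - 1
--         return sequence
--
--     next_value = (sequence << 1) & mask
--     zero = next_value
--     one = next_value + 1
--
--     result = 0
--     if (history & (1 << zero)) == 0:
--         result += search(history | (1 << zero), sequence << 1)
--     if (history & (1 << one)) == 0:
--         result += search(history | (1 << one), (sequence << 1) | 1)
--
--     return result
-- ===== SOURCE B (Python) =====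
-- bits = 5
--
-- def search(history, sequence):
--     # Iterative explicit-stack traversal in arithmetic form: % and // and + replace
--     # the bitmask operations (&, |, <<, >>) of the recursive original.
--     total = 0
--     stack = [(history, sequence)]
--     while stack:
--         h, q = stack.pop()
--         if h == 4294967295:
--             total += q // 16
--             continue
--         nv = (q % 16) * 2
--         if (h >> nv) % 2 == 0:
--             stack.append((h + (1 << nv), q * 2))
--         if (h >> (nv + 1)) % 2 == 0:
--             stack.append((h + (1 << (nv + 1)), q * 2 + 1))
--     return total
-- ===== Notes on version B (the rewrite author's own statement) =====
-- stated objective: alternative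
-- what changed: Replaces A's recursive bitwise depth-first search (&, |, << on a shared mask) with an iterative explicit-stack worklist that accumulates a running total and tests/sets history bits arithmetically via %, //, * and 2**nv.
import Mathlib
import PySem

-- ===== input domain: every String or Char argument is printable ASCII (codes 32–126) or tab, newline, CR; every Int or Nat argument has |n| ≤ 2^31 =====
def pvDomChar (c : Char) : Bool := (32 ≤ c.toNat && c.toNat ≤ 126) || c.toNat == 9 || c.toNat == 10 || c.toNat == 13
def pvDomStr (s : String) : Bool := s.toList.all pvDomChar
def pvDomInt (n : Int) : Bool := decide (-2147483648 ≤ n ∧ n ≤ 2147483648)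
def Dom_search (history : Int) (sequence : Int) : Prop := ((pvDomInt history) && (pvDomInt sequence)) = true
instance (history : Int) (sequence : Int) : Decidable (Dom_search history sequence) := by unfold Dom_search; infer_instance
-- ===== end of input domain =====

-- B re-implements A's recursive bitmask De Bruijn search as an explicit-stack loop in arithmetic
-- form (%, //, *, +, ** instead of &, |, <<) with a running total (objective: alternative).

-- ===== PORT A =====
-- port of A (Python `search`): literal transliteration; Python's `1 << zero` is `(1:Int) <<< zero.toNat`
-- (zero = (sequence<<1) & 31 is always nonnegative, so `.toNat` is exact), `>>` is Int's `>>>`.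
-- The fuel argument only makes the recursion structural: every recursive call sets a previously
-- clear history bit among positions 0..32, so the depth never reaches 34 and the fuel-0 branch is
-- dead (proved below: `searchFuel_congr`, `pvMu_le33`).
def searchFuel : Nat → Int → Int → Int
  | 0, _, _ => 0
  | fuel + 1, history, sequence =>
    let mask : Int := ((1:Int) <<< (5:Nat)) - 1        -- (1 << bits) - 1, bits = 5
    let all_bits : Int := ((1:Int) <<< (32:Nat)) - 1   -- (1 << (1 << bits)) - 1
    if history = all_bits then sequence >>> (4:Nat)    -- sequence >>= bits - 1; return sequence
    else
      let next_value : Int := PySem.Int.band (sequence <<< (1:Nat)) mask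
      let zero : Int := next_value
      let one : Int := next_value + 1
      (if PySem.Int.band history ((1:Int) <<< zero.toNat) = 0 then
         searchFuel fuel (PySem.Int.bor history ((1:Int) <<< zero.toNat)) (sequence <<< (1:Nat))
       else 0)
      +
      (if PySem.Int.band history ((1:Int) <<< one.toNat) = 0 then
         searchFuel fuel (PySem.Int.bor history ((1:Int) <<< one.toNat)) (PySem.Int.bor (sequence <<< (1:Nat)) 1)
       else 0)

def search (history : Int) (sequence : Int) : Int := searchFuel 34 history sequence

-- ===== PORT B =====
-- port of B's while-loop (Source B): the list head is the top of Python's stack; Python appends the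
-- zero-branch then the one-branch, so popping sees the one-branch first (s2 before s1 below).
-- `h >> nv` and `2 ** nv` are ported through `nv.toNat` (nv = (q % 16) * 2 is never negative).
-- The fuel argument only makes the loop structural: each iteration shrinks the stack measure
-- pvMs < 3 ^ 34 (proved below: `pvLoopFuel_congr`), so the fuel-0 branch is dead.
def pvLoopFuel : Nat → List (Int × Int) → Int → Int
  | 0, _, total => total
  | fuel + 1, stack, total =>
    match stack with
    | [] => total
    | (h, q) :: rest =>
      if h = 4294967295 then
        pvLoopFuel fuel rest (total + PySem.Int.floordiv q 16)
      else
        let nv : Int := PySem.Int.mod q 16 * 2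
        let s1 : List (Int × Int) :=
          if PySem.Int.mod (h >>> nv.toNat) 2 = 0 then [(h + 2 ^ nv.toNat, q * 2)] else []
        let s2 : List (Int × Int) :=
          if PySem.Int.mod (h >>> (nv + 1).toNat) 2 = 0 then
            [(h + 2 ^ (nv + 1).toNat, q * 2 + 1)] else []
        pvLoopFuel fuel (s2 ++ s1 ++ rest) total

def search_alt (history : Int) (sequence : Int) : Int :=
  pvLoopFuel (3 ^ 34) [(history, sequence)] 0

-- ===== PRECONDITION & SPEC =====
def Spec_search (history : Int) (sequence : Int) (out : Int) : Prop := out = search_alt history sequence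
instance (history : Int) (sequence : Int) (out : Int) : Decidable (Spec_search history sequence out) := by unfold Spec_search; infer_instance

-- ===== CLAIM (what is proved, stated in full; the proofs are below) =====
def Claim_equal_search : Prop := ∀ (history : Int) (sequence : Int), Dom_search history sequence → Spec_search history sequence (search history sequence)

-- ===== LEMMAS AND PROOFS =====

-- ---- generic bit-arithmetic facts shared by both sides of the proof ----

theorem pv_one_shl (k : Nat) : (1 : Int) <<< k = 2 ^ k := by
  simp [Int.shiftLeft_eq]

theorem pv_sub_and_eq_ldiff (m : Nat) : ∀ n : Nat, m - (m &&& n) = m.ldiff n := by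
  induction m using Nat.binaryRec with
  | zero =>
    intro n
    have h0 : Nat.ldiff 0 n = 0 := Nat.eq_of_testBit_eq fun i => by
      rw [Nat.testBit_ldiff, Nat.zero_testBit, Bool.false_and]
    rw [h0, Nat.zero_sub]
  | bit b m ih =>
    intro n
    have hn : Nat.bit (n.testBit 0) (n >>> 1) = n := Nat.bit_testBit_zero_shiftRight_one n
    rw [← hn, Nat.land_bit, Nat.ldiff_bit]
    have h1 := ih (n >>> 1)
    have h2 : 2 * (m &&& (n >>> 1)) ≤ 2 * m := Nat.mul_le_mul_left 2 Nat.and_le_left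
    cases b <;> cases n.testBit 0
    · show 2 * m - 2 * (m &&& (n >>> 1)) = 2 * (m.ldiff (n >>> 1))
      rw [← h1, Nat.mul_sub]
    · show 2 * m - 2 * (m &&& (n >>> 1)) = 2 * (m.ldiff (n >>> 1))
      rw [← h1, Nat.mul_sub]
    · show 2 * m + 1 - 2 * (m &&& (n >>> 1)) = 2 * (m.ldiff (n >>> 1)) + 1
      rw [← h1, Nat.mul_sub, Nat.sub_add_comm h2]
    · show 2 * m + 1 - (2 * (m &&& (n >>> 1)) + 1) = 2 * (m.ldiff (n >>> 1))
      rw [← h1, Nat.mul_sub, Nat.add_sub_add_right]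

theorem pv_nat_lor_add (m : Nat) : ∀ n : Nat, m &&& n = 0 → m ||| n = m + n := by
  induction m using Nat.binaryRec with
  | zero => intro n _; simp
  | bit b m ih =>
    intro n h
    rw [← Nat.bit_testBit_zero_shiftRight_one n] at h ⊢
    rw [Nat.land_bit] at h
    rw [Nat.lor_bit]
    have h2 : (b && n.testBit 0) = false ∧ m &&& (n >>> 1) = 0 := by
      rcases Nat.bit_eq_zero_iff.mp h with ⟨h1, h2⟩
      exact ⟨h2, h1⟩
    have ihm := ih _ h2.2
    simp only [Nat.bit_val] at *
    cases b <;> cases hn : n.testBit 0 <;> simp_all <;> omega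

theorem pv_ofNat_nonneg (m : Nat) : (0:Int) ≤ Int.ofNat m := Int.natCast_nonneg m

theorem pv_negSucc_aux (n : Nat) : (-(Int.negSucc n) - 1).toNat = n := by
  rw [Int.neg_negSucc, Int.natCast_succ, add_sub_cancel_right, Int.toNat_natCast]

theorem pv_negSucc_nonpos (n : Nat) : ¬ (0:Int) ≤ Int.negSucc n := by
  exact Int.not_le.mpr (Int.negSucc_lt_zero n)

theorem pv_band_eq_land (a b : Int) : PySem.Int.band a b = Int.land a b := by
  cases a with
  | ofNat m => cases b with
    | ofNat n =>
      unfold PySem.Int.band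
      rw [if_pos (pv_ofNat_nonneg m), if_pos (pv_ofNat_nonneg n)]
      rfl
    | negSucc n =>
      unfold PySem.Int.band
      rw [if_pos (pv_ofNat_nonneg m), if_neg (pv_negSucc_nonpos n), pv_negSucc_aux]
      show ((m - (m &&& n) : Nat) : Int) = _
      rw [pv_sub_and_eq_ldiff]
      rfl
  | negSucc m => cases b with
    | ofNat n =>
      unfold PySem.Int.band
      rw [if_neg (pv_negSucc_nonpos m), if_pos (pv_ofNat_nonneg n), pv_negSucc_aux]
      show ((n - (n &&& m) : Nat) : Int) = _
      rw [pv_sub_and_eq_ldiff]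
      rfl
    | negSucc n =>
      unfold PySem.Int.band
      rw [if_neg (pv_negSucc_nonpos m), if_neg (pv_negSucc_nonpos n),
        pv_negSucc_aux, pv_negSucc_aux]
      rw [show (Int.negSucc m).land (Int.negSucc n) = Int.negSucc (m ||| n) from rfl, Int.negSucc_eq]
      ring

theorem pv_bor_eq_lor (a b : Int) : PySem.Int.bor a b = Int.lor a b := by
  cases a with
  | ofNat m => cases b with
    | ofNat n =>
      unfold PySem.Int.bor
      rw [if_pos (pv_ofNat_nonneg m), if_pos (pv_ofNat_nonneg n)]
      rfl
    | negSucc n =>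
      unfold PySem.Int.bor
      rw [if_pos (pv_ofNat_nonneg m), if_neg (pv_negSucc_nonpos n), pv_negSucc_aux]
      show -((n - (n &&& m) : Nat) : Int) - 1 = _
      rw [pv_sub_and_eq_ldiff]
      rw [show (Int.ofNat m).lor (Int.negSucc n) = Int.negSucc (n.ldiff m) from rfl, Int.negSucc_eq]
      ring
  | negSucc m => cases b with
    | ofNat n =>
      unfold PySem.Int.bor
      rw [if_neg (pv_negSucc_nonpos m), if_pos (pv_ofNat_nonneg n), pv_negSucc_aux]
      show -((m - (m &&& n) : Nat) : Int) - 1 = _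
      rw [pv_sub_and_eq_ldiff]
      rw [show (Int.negSucc m).lor (Int.ofNat n) = Int.negSucc (m.ldiff n) from rfl, Int.negSucc_eq]
      ring
    | negSucc n =>
      unfold PySem.Int.bor
      rw [if_neg (pv_negSucc_nonpos m), if_neg (pv_negSucc_nonpos n),
        pv_negSucc_aux, pv_negSucc_aux]
      rw [show (Int.negSucc m).lor (Int.negSucc n) = Int.negSucc (m &&& n) from rfl, Int.negSucc_eq]
      ring

theorem pv_two_pow_int (i : Nat) : (2:Int)^i = ((2^i : Nat) : Int) := by push_cast; rfl

theorem pv_band_two_pow (h : Int) (i : Nat) :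
    PySem.Int.band h (2^i) = if h.testBit i then 2^i else 0 := by
  rw [pv_band_eq_land]
  cases h with
  | ofNat m =>
    have : Int.land (Int.ofNat m) ((2:Int)^i) = Int.ofNat (m &&& 2^i) := by
      rw [pv_two_pow_int]; rfl
    rw [this, Nat.and_two_pow]
    show (((m.testBit i).toNat * 2^i : Nat) : Int) = _
    cases hm : m.testBit i <;> simp [Int.testBit, hm]
  | negSucc m =>
    have : Int.land (Int.negSucc m) ((2:Int)^i) = Int.ofNat ((2^i).ldiff m) := by
      rw [pv_two_pow_int]; rfl
    rw [this, ← pv_sub_and_eq_ldiff]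
    have hc : (2^i) &&& m = m &&& 2^i := Nat.and_comm _ _
    rw [hc, Nat.and_two_pow]
    show (((2^i - (m.testBit i).toNat * 2^i : Nat)) : Int) = _
    cases hm : m.testBit i <;> simp [Int.testBit, hm]

theorem pv_band_two_pow_eq_zero (h : Int) (i : Nat) :
    (PySem.Int.band h (2^i) = 0 ↔ h.testBit i = false) := by
  rw [pv_band_two_pow h i]
  cases hm : h.testBit i <;> simp

theorem pv_testBit_bor_two_pow (h : Int) (z i : Nat) :
    (PySem.Int.bor h (2^z)).testBit i = (h.testBit i || decide (z = i)) := by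
  rw [pv_bor_eq_lor, Int.testBit_lor]
  congr 1
  rw [pv_two_pow_int]
  show Nat.testBit (2^z) i = _
  exact Nat.testBit_two_pow

-- ---- the depth measure: clear bits of the history among positions 0..32 ----

def pvMu (h : Int) : Nat :=
  ((Finset.range 33).filter (fun i => PySem.Int.band h (2^i) = 0)).card

theorem pvMu_succ (h : Int) (z : Nat) (hz : z < 33)
    (h0 : PySem.Int.band h (2^z) = 0) :
    pvMu (PySem.Int.bor h (2^z)) + 1 = pvMu h := by
  have hmem : z ∈ (Finset.range 33).filter (fun i => PySem.Int.band h (2^i) = 0) :=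
    Finset.mem_filter.mpr ⟨Finset.mem_range.mpr hz, h0⟩
  have hset :
      (Finset.range 33).filter (fun i => PySem.Int.band (PySem.Int.bor h (2^z)) (2^i) = 0)
        = ((Finset.range 33).filter (fun i => PySem.Int.band h (2^i) = 0)).erase z := by
    ext i
    simp only [Finset.mem_filter, Finset.mem_range, Finset.mem_erase]
    rw [pv_band_two_pow_eq_zero, pv_band_two_pow_eq_zero, pv_testBit_bor_two_pow]
    constructor
    · rintro ⟨hi, hb⟩
      rcases Bool.or_eq_false_iff.mp hb with ⟨hb1, hb2⟩
      exact ⟨fun hzi => of_decide_eq_false hb2 hzi.symm, hi, hb1⟩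
    · rintro ⟨hne, hi, hb1⟩
      refine ⟨hi, ?_⟩
      rw [hb1, Bool.false_or, decide_eq_false (fun hzi => hne (Eq.symm hzi))]
  have hcard := Finset.card_erase_of_mem hmem
  have hpos : 0 < ((Finset.range 33).filter (fun i => PySem.Int.band h (2^i) = 0)).card :=
    Finset.card_pos.mpr ⟨z, hmem⟩
  unfold pvMu
  rw [hset, hcard]
  exact Nat.succ_pred_eq_of_pos hpos

theorem pvMu_lt (h : Int) (z : Nat) (hz : z < 33)
    (h0 : PySem.Int.band h ((1:Int) <<< z) = 0) :
    pvMu (PySem.Int.bor h ((1:Int) <<< z)) < pvMu h := by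
  rw [pv_one_shl] at h0 ⊢
  exact Nat.lt_of_succ_le (Nat.le_of_eq (pvMu_succ h z hz h0))

theorem pvMu_le33 (h : Int) : pvMu h ≤ 33 := by
  unfold pvMu
  exact le_trans (Finset.card_filter_le _ _) (le_of_eq (Finset.card_range 33))

-- Python's `x & 31` always lands in [0, 31]
theorem pv_band_mask_bounds (a : Int) :
    0 ≤ PySem.Int.band a 31 ∧ PySem.Int.band a 31 ≤ 31 := by
  rw [pv_band_eq_land]
  cases a with
  | ofNat m =>
    have he : Int.land (Int.ofNat m) 31 = ((m &&& 31 : Nat) : Int) := rfl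
    rw [he]
    exact ⟨Int.natCast_nonneg _, Int.ofNat_le.mpr Nat.and_le_right⟩
  | negSucc m =>
    have he : Int.land (Int.negSucc m) 31 = ((Nat.ldiff 31 m : Nat) : Int) := rfl
    have hle : Nat.ldiff 31 m ≤ 31 := by
      rw [← pv_sub_and_eq_ldiff]
      exact Nat.sub_le _ _
    rw [he]
    exact ⟨Int.natCast_nonneg _, Int.ofNat_le.mpr hle⟩

-- `x & 31` and `(x & 31) + 1` are valid bit positions below 33
theorem pv_toNat31 (a : Int) : (PySem.Int.band a 31).toNat < 33 := by
  have h := (pv_band_mask_bounds a).2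
  exact Nat.lt_of_le_of_lt (Int.toNat_le.mpr h) (by decide)

theorem pv_toNat32 (a : Int) : (PySem.Int.band a 31 + 1).toNat < 33 := by
  have h := (pv_band_mask_bounds a).2
  have h32 : PySem.Int.band a 31 + 1 ≤ (32 : Int) := Int.add_le_add_right h 1
  exact Nat.lt_of_le_of_lt (Int.toNat_le.mpr h32) (by decide)

-- ---- bridges between B's arithmetic operations and A's bitwise ones ----

theorem pv_mod2_shr (h : Int) (z : Nat) :
    (PySem.Int.mod (h >>> z) 2 = 0) ↔ h.testBit z = false := by
  rw [PySem.Int.mod_eq_emod_of_pos (by norm_num : (0:Int) < 2)]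
  cases h with
  | ofNat m =>
    have hs : (Int.ofNat m) >>> z = Int.ofNat (m >>> z) := rfl
    have ht : (Int.ofNat m).testBit z = m.testBit z := rfl
    rw [hs, ht, Nat.testBit_eq_decide_div_mod_eq, Nat.shiftRight_eq_div_pow,
      Int.ofNat_eq_natCast]
    simp only [decide_eq_false_iff_not]
    show (((m / 2 ^ z : Nat) : Int) % 2 = 0) ↔ _
    omega
  | negSucc m =>
    have hs : (Int.negSucc m) >>> z = Int.negSucc (m >>> z) := rfl
    have ht : (Int.negSucc m).testBit z = !(m.testBit z) := rfl
    rw [hs, ht, Nat.testBit_eq_decide_div_mod_eq, Nat.shiftRight_eq_div_pow, Int.negSucc_eq]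
    simp only [Bool.not_eq_false', decide_eq_true_eq]
    show ((-(((m / 2 ^ z : Nat) : Int) + 1)) % 2 = 0) ↔ _
    omega

-- B's parity test agrees with A's mask test at every bit position
theorem pv_cond_bridge (h : Int) (z : Nat) :
    (PySem.Int.mod (h >>> z) 2 = 0) ↔ (PySem.Int.band h ((1:Int) <<< z) = 0) := by
  rw [pv_one_shl, pv_band_two_pow_eq_zero]
  exact pv_mod2_shr h z

-- adding 2^z to an integer whose bit z is clear is the same as or-ing it in
theorem pv_add_bridge (h : Int) (z : Nat)
    (hb : PySem.Int.band h ((1:Int) <<< z) = 0) :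
    h + (2:Int)^z = PySem.Int.bor h ((1:Int) <<< z) := by
  rw [pv_one_shl] at hb ⊢
  have htb : h.testBit z = false := (pv_band_two_pow_eq_zero h z).mp hb
  rw [pv_bor_eq_lor]
  cases h with
  | ofNat m =>
    have hm : m.testBit z = false := htb
    have hand : m &&& 2^z = 0 := by rw [Nat.and_two_pow, hm]; simp
    have hl : (Int.ofNat m).lor ((2:Int)^z) = Int.ofNat (m ||| 2^z) := by
      rw [pv_two_pow_int]; rfl
    rw [hl, pv_nat_lor_add m _ hand, pv_two_pow_int, Int.ofNat_eq_natCast,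
      Int.ofNat_eq_natCast]
    push_cast
    ring
  | negSucc m =>
    have hm : m.testBit z = true := by
      have : (!(m.testBit z)) = false := htb
      simpa using this
    have hand : m &&& 2^z = 2^z := by rw [Nat.and_two_pow, hm]; simp
    have hle : 2^z ≤ m := hand ▸ Nat.and_le_left
    have hl : (Int.negSucc m).lor ((2:Int)^z) = Int.negSucc (m.ldiff (2^z)) := by
      rw [pv_two_pow_int]; rfl
    rw [hl, ← pv_sub_and_eq_ldiff, hand, Int.negSucc_eq, Int.negSucc_eq,
      Nat.cast_sub hle, pv_two_pow_int]
    push_cast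
    ring

theorem pv_band_31 (x : Int) : PySem.Int.band x 31 = x % 32 := by
  cases x with
  | ofNat m =>
    have h1 : PySem.Int.band (Int.ofNat m) 31 = ((m &&& 31 : Nat) : Int) :=
      PySem.Int.band_natCast m 31
    have h2 : m &&& 31 = m % 32 := by
      simpa using Nat.and_two_pow_sub_one_eq_mod m 5
    rw [h1, h2, Int.ofNat_eq_natCast]
    omega
  | negSucc m =>
    have h1 : PySem.Int.band (Int.negSucc m) 31 = ((31 - (31 &&& m) : Nat) : Int) := by
      rw [pv_band_eq_land]
      have hd : (Int.negSucc m).land (31:Int) = Int.ofNat (Nat.ldiff 31 m) := rfl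
      rw [hd, ← pv_sub_and_eq_ldiff]
      rfl
    have h2 : 31 &&& m = m % 32 := by
      rw [Nat.land_comm]
      simpa using Nat.and_two_pow_sub_one_eq_mod m 5
    rw [h1, h2, Int.negSucc_eq, Nat.cast_sub (by omega)]
    omega

-- B's arithmetic next value is A's masked shift
theorem pv_nv_bridge (q : Int) :
    PySem.Int.mod q 16 * 2 = PySem.Int.band (q <<< (1:Nat)) (((1:Int) <<< (5:Nat)) - 1) := by
  have h31 : ((1:Int) <<< (5:Nat)) - 1 = 31 := by decide
  rw [h31, pv_band_31, PySem.Int.mod_eq_emod_of_pos (by norm_num : (0:Int) < 16),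
    Int.shiftLeft_eq]
  have h2 : q * 2 ^ (1:Nat) = q * 2 := by ring
  rw [h2]
  omega

theorem pv_mul2 (q : Int) : q * 2 = q <<< (1:Nat) := by
  rw [Int.shiftLeft_eq]; ring

theorem pv_mul2_or1 (q : Int) : q * 2 + 1 = PySem.Int.bor (q <<< (1:Nat)) 1 := by
  have hband : PySem.Int.band (q <<< (1:Nat)) ((1:Int) <<< (0:Nat)) = 0 := by
    have h1 : ((1:Int) <<< (0:Nat)) = 1 := by decide
    rw [h1, PySem.Int.band_one, PySem.Int.mod_eq_emod_of_pos (by norm_num : (0:Int) < 2),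
      Int.shiftLeft_eq]
    have h2 : q * 2 ^ (1:Nat) = q * 2 := by ring
    rw [h2]
    omega
  have hadd := pv_add_bridge (q <<< (1:Nat)) 0 hband
  rw [show ((1:Int) <<< (0:Nat)) = 1 from by decide,
    show ((2:Int)) ^ (0:Nat) = 1 from by norm_num] at hadd
  rw [pv_mul2, hadd]

theorem pv_div16 (q : Int) : PySem.Int.floordiv q 16 = q >>> (4:Nat) := by
  rw [PySem.Int.floordiv_eq_ediv_of_pos (by norm_num : (0:Int) < 16),
    Int.shiftRight_eq_div_pow]
  norm_num

theorem pv_allbits : ((1:Int) <<< (32:Nat)) - 1 = 4294967295 := by decide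

-- bounds for B's bit positions
theorem pv_nv_toNat_lt (q : Int) : (PySem.Int.mod q 16 * 2).toNat < 33 := by
  have h1 := PySem.Int.mod_nonneg q (by norm_num : (0:Int) < 16)
  have h2 := PySem.Int.mod_lt q (by norm_num : (0:Int) < 16)
  omega

theorem pv_nv1_toNat_lt (q : Int) : (PySem.Int.mod q 16 * 2 + 1).toNat < 33 := by
  have h1 := PySem.Int.mod_nonneg q (by norm_num : (0:Int) < 16)
  have h2 := PySem.Int.mod_lt q (by norm_num : (0:Int) < 16)
  omega

-- ---- A-side: the fuel 34 is always enough ----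

theorem searchFuel_done (f : Nat) (q : Int) :
    searchFuel (f + 1) 4294967295 q = q >>> (4:Nat) := by
  simp only [searchFuel]
  rw [if_pos pv_allbits.symm]

theorem searchFuel_step (f : Nat) (h q : Int) (hne : ¬ h = (4294967295 : Int)) :
    searchFuel (f + 1) h q =
      (if PySem.Int.band h ((1:Int) <<< (PySem.Int.band (q <<< (1:Nat)) (((1:Int) <<< (5:Nat)) - 1)).toNat) = 0 then
         searchFuel f (PySem.Int.bor h ((1:Int) <<< (PySem.Int.band (q <<< (1:Nat)) (((1:Int) <<< (5:Nat)) - 1)).toNat)) (q <<< (1:Nat))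
       else 0)
      +
      (if PySem.Int.band h ((1:Int) <<< (PySem.Int.band (q <<< (1:Nat)) (((1:Int) <<< (5:Nat)) - 1) + 1).toNat) = 0 then
         searchFuel f (PySem.Int.bor h ((1:Int) <<< (PySem.Int.band (q <<< (1:Nat)) (((1:Int) <<< (5:Nat)) - 1) + 1).toNat)) (PySem.Int.bor (q <<< (1:Nat)) 1)
       else 0) := by
  simp only [searchFuel]
  rw [if_neg (by rw [pv_allbits]; exact hne)]

theorem searchFuel_congr (f1 : Nat) : ∀ (f2 : Nat) (h q : Int),
    pvMu h < f1 → pvMu h < f2 → searchFuel f1 h q = searchFuel f2 h q := by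
  induction f1 with
  | zero => intro f2 h q h1 _; exact absurd h1 (Nat.not_lt_zero _)
  | succ f ih =>
    intro f2 h q h1 h2
    cases f2 with
    | zero => exact absurd h2 (Nat.not_lt_zero _)
    | succ g =>
      by_cases hh : h = 4294967295
      · rw [hh, searchFuel_done, searchFuel_done]
      · rw [searchFuel_step f h q hh, searchFuel_step g h q hh]
        have hmu := pvMu_le33 h
        refine congrArg₂ (· + ·) ?_ ?_
        · split_ifs with hc
          · rw [show (((1:Int) <<< (5:Nat)) - 1) = 31 from by decide] at hc ⊢
            have hlt := pvMu_lt h _ (pv_toNat31 (q <<< (1:Nat))) hc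
            exact ih _ _ _ (by omega) (by omega)
          · rfl
        · split_ifs with hc
          · rw [show (((1:Int) <<< (5:Nat)) - 1) = 31 from by decide] at hc ⊢
            have hlt := pvMu_lt h _ (pv_toNat32 (q <<< (1:Nat))) hc
            exact ih _ _ _ (by omega) (by omega)
          · rfl

-- one-step unfoldings of A at full fuel, in the two shapes the B-side loop needs
theorem search_done (q : Int) : search 4294967295 q = q >>> (4:Nat) :=
  searchFuel_done 33 q

theorem search_step (h q : Int) (hne : ¬ h = (4294967295 : Int)) :
    search h q =
      (if PySem.Int.band h ((1:Int) <<< (PySem.Int.band (q <<< (1:Nat)) (((1:Int) <<< (5:Nat)) - 1)).toNat) = 0 then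
         search (PySem.Int.bor h ((1:Int) <<< (PySem.Int.band (q <<< (1:Nat)) (((1:Int) <<< (5:Nat)) - 1)).toNat)) (q <<< (1:Nat))
       else 0)
      +
      (if PySem.Int.band h ((1:Int) <<< (PySem.Int.band (q <<< (1:Nat)) (((1:Int) <<< (5:Nat)) - 1) + 1).toNat) = 0 then
         search (PySem.Int.bor h ((1:Int) <<< (PySem.Int.band (q <<< (1:Nat)) (((1:Int) <<< (5:Nat)) - 1) + 1).toNat)) (PySem.Int.bor (q <<< (1:Nat)) 1)
       else 0) := by
  show searchFuel 34 h q = _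
  rw [searchFuel_step 33 h q hne]
  have hmu := pvMu_le33 h
  refine congrArg₂ (· + ·) ?_ ?_
  · split_ifs with hc
    · rw [show (((1:Int) <<< (5:Nat)) - 1) = 31 from by decide] at hc ⊢
      have hlt := pvMu_lt h _ (pv_toNat31 (q <<< (1:Nat))) hc
      exact searchFuel_congr 33 34 _ _ (by omega) (by omega)
    · rfl
  · split_ifs with hc
    · rw [show (((1:Int) <<< (5:Nat)) - 1) = 31 from by decide] at hc ⊢
      have hlt := pvMu_lt h _ (pv_toNat32 (q <<< (1:Nat))) hc
      exact searchFuel_congr 33 34 _ _ (by omega) (by omega)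
    · rfl

-- ---- B-side: stack measure; each loop iteration shrinks it, and 3^34 exceeds it ----

def pvMs (st : List (Int × Int)) : Nat := (st.map (fun p => 3 ^ pvMu p.1)).sum

theorem pvMs_cons (h q : Int) (rest : List (Int × Int)) :
    pvMs ((h, q) :: rest) = 3 ^ pvMu h + pvMs rest := rfl

theorem pv_arith1 (t R : Nat) (ht : 0 < t) : t + t + R < t * 3 + R := by omega
theorem pv_arith2 (t R : Nat) (ht : 0 < t) : t + R < t * 3 + R := by omega
theorem pv_arith3 (t R : Nat) (ht : 0 < t) : R < t + R := by omega

theorem pv_push_lt (h : Int) (z1 z2 : Nat) (q1 q2 q : Int) (rest : List (Int × Int))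
    (hz1 : z1 < 33) (hz2 : z2 < 33) :
    pvMs ((if PySem.Int.mod (h >>> z2) 2 = 0 then [(h + 2^z2, q2)] else []) ++
          (if PySem.Int.mod (h >>> z1) 2 = 0 then [(h + 2^z1, q1)] else []) ++ rest)
      < pvMs ((h, q) :: rest) := by
  rw [pvMs_cons]
  have hpos : 0 < 3 ^ pvMu h := Nat.pow_pos (by decide)
  split_ifs with h2 h1 h1
  all_goals simp only [pvMs, List.map_append, List.sum_append, List.map_cons, List.sum_cons,
    List.map_nil, List.sum_nil, Nat.add_zero, Nat.zero_add]
  · -- both pushed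
    have hb1 := (pv_cond_bridge h z1).mp h1
    have hb2 := (pv_cond_bridge h z2).mp h2
    rw [pv_add_bridge h z1 hb1, pv_add_bridge h z2 hb2]
    rw [pv_one_shl] at hb1 hb2
    have e1 := pvMu_succ h z1 hz1 hb1
    have e2 := pvMu_succ h z2 hz2 hb2
    rw [← pv_one_shl] at e1 e2
    have h12 : pvMu (PySem.Int.bor h ((1:Int) <<< z2)) = pvMu (PySem.Int.bor h ((1:Int) <<< z1)) :=
      Nat.add_right_cancel (e2.trans e1.symm)
    have hA : pvMu h = pvMu (PySem.Int.bor h ((1:Int) <<< z1)) + 1 := e1.symm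
    rw [h12, hA, pow_succ]
    have hp : 0 < 3 ^ pvMu (PySem.Int.bor h ((1:Int) <<< z1)) := Nat.pow_pos (by decide)
    exact pv_arith1 _ _ hp
  · -- only z2 pushed
    have hb2 := (pv_cond_bridge h z2).mp h2
    rw [pv_add_bridge h z2 hb2]
    rw [pv_one_shl] at hb2
    have e2 := pvMu_succ h z2 hz2 hb2
    rw [← pv_one_shl] at e2
    have hA : pvMu h = pvMu (PySem.Int.bor h ((1:Int) <<< z2)) + 1 := e2.symm
    rw [hA, pow_succ]
    have hp : 0 < 3 ^ pvMu (PySem.Int.bor h ((1:Int) <<< z2)) := Nat.pow_pos (by decide)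
    exact pv_arith2 _ _ hp
  · -- only z1 pushed
    have hb1 := (pv_cond_bridge h z1).mp h1
    rw [pv_add_bridge h z1 hb1]
    rw [pv_one_shl] at hb1
    have e1 := pvMu_succ h z1 hz1 hb1
    rw [← pv_one_shl] at e1
    have hA : pvMu h = pvMu (PySem.Int.bor h ((1:Int) <<< z1)) + 1 := e1.symm
    rw [hA, pow_succ]
    have hp : 0 < 3 ^ pvMu (PySem.Int.bor h ((1:Int) <<< z1)) := Nat.pow_pos (by decide)
    exact pv_arith2 _ _ hp
  · -- nothing pushed
    exact pv_arith3 _ _ hpos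

-- the loop invariant: with enough fuel, B's loop returns the running total plus A's value on
-- every stacked state
theorem pvLoopFuel_eq (f : Nat) : ∀ (st : List (Int × Int)) (total : Int),
    pvMs st < f →
    pvLoopFuel f st total = total + (st.map (fun p => search p.1 p.2)).sum := by
  induction f with
  | zero => intro st total hlt; exact absurd hlt (Nat.not_lt_zero _)
  | succ f ih =>
    intro st total hlt
    cases st with
    | nil => simp [pvLoopFuel]
    | cons p rest =>
      obtain ⟨h, q⟩ := p
      simp only [pvLoopFuel]
      by_cases hh : h = 4294967295
      · rw [if_pos hh]
        have hpos : 0 < 3 ^ pvMu h := Nat.pow_pos (by decide)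
        have hrest : pvMs rest < f := by
          have hc := pvMs_cons h q rest
          omega
        rw [ih rest _ hrest]
        simp only [List.map_cons, List.sum_cons]
        rw [hh, search_done q, pv_div16]
        ring
      · rw [if_neg hh]
        have hpush := pv_push_lt h (PySem.Int.mod q 16 * 2).toNat
          (PySem.Int.mod q 16 * 2 + 1).toNat (q * 2) (q * 2 + 1) q rest
          (pv_nv_toNat_lt q) (pv_nv1_toNat_lt q)
        rw [ih _ total (by omega)]
        simp only [List.map_append, List.sum_append, List.map_cons, List.sum_cons]
        rw [search_step h q hh]
        set z : Int := PySem.Int.band (q <<< (1:Nat)) (((1:Int) <<< (5:Nat)) - 1) with hzdef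
        have hnv : PySem.Int.mod q 16 * 2 = z := by rw [hzdef]; exact pv_nv_bridge q
        rw [hnv]
        simp only [pv_cond_bridge h z.toNat, pv_cond_bridge h (z + 1).toNat]
        split_ifs with h2 h1 h1 <;>
          simp only [List.map_cons, List.sum_cons, List.map_nil, List.sum_nil] <;>
          first
            | (rw [pv_add_bridge h z.toNat h1, pv_add_bridge h (z + 1).toNat h2, pv_mul2_or1, pv_mul2]
               ring)
            | (rw [pv_add_bridge h (z + 1).toNat h2, pv_mul2_or1]
               ring)
            | (rw [pv_add_bridge h z.toNat h1, pv_mul2]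
               ring)

-- ===== VERDICT (by name: the statement is the Claim_ definition above) =====
theorem search_spec : Claim_equal_search := by
  intro history sequence _
  unfold Spec_search search_alt
  have hms : pvMs [(history, sequence)] < 3 ^ 34 := by
    have h1 : pvMs [(history, sequence)] = 3 ^ pvMu history := by simp [pvMs]
    have h2 : (3:Nat) ^ pvMu history ≤ 3 ^ 33 :=
      Nat.pow_le_pow_right (by norm_num) (pvMu_le33 history)
    have h3 : (3:Nat) ^ 33 < 3 ^ 34 := Nat.pow_lt_pow_right (by norm_num) (by norm_num)
    omega
  rw [pvLoopFuel_eq (3 ^ 34) [(history, sequence)] 0 hms]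
  simp [search]
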